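-- pv_equiv track=rewrite | github.com/miriamhamidi/COGS18Project | functions.py | make_courses_taken_list
-- ===== SOURCE A (Python) =====
-- def make_courses_taken_list(taken_courses):
--     """ Creates list of courses the user from their input string.
--
--         Paramaters
--         ----------
--         taken_courses: string
--             user inputted string containing courses they took as three digit numbers separated by commas
--
--         Returns
--         -------
--         taken_list: list of strings
--             A list with the all the ECE courses the user took as three digit numbers.
--
--     """
--     taken_list = []
--     class_title = ''
--
--     #refer to similar technique in get_courses function above
--     for character in taken_courses:
--         if character in ['0', '1', '2', '3', '4', '5', '6', '7', '8', '9']: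
--             class_title = class_title + character
--             if len(class_title) == 3:
--                 taken_list.append(class_title)
--                 class_title = ''
--
--     taken_list = set(taken_list)
--     taken_list = list(taken_list)
--
--     return taken_list
-- ===== SOURCE B (Python) =====
-- def make_courses_taken_list(taken_courses):
--     # Two-pass: extract digit characters first, then chop into complete 3-char chunks.
--     digits = [c for c in taken_courses
--               if c in ['0', '1', '2', '3', '4', '5', '6', '7', '8', '9']]
--     chunks = []
--     while len(digits) >= 3:
--         chunks.append(''.join(digits[:3]))
--         digits = digits[3:]
--     return list(set(chunks))
-- ===== Notes on version B (the rewrite author's own statement) =====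
-- stated objective: simpler
-- what changed: Replaces A's single interleaved scan carrying a partial-title accumulator with a two-pass shape: extract all digit characters first, then chop the digit list into complete 3-character chunks by repeated slicing, deduplicating with set() as A does.
import Mathlib
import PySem

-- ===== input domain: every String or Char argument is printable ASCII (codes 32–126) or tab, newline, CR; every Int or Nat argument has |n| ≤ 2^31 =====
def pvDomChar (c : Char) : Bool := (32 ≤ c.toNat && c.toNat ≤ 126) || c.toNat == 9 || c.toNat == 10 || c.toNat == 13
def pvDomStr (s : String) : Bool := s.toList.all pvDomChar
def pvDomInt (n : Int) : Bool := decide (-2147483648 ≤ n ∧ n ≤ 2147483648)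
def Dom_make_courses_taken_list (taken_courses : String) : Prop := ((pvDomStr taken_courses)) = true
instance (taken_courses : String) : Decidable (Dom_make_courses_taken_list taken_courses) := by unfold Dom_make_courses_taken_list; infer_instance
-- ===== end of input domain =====

-- B reorganises A's single interleaved scan into extract-digits-then-chunk two passes; return value proved equal (as a set, like Python's list(set(...))).

-- shared character-class test: both Pythons use the same digit-list membership
def pvIsDigitChar (c : Char) : Bool := ['0', '1', '2', '3', '4', '5', '6', '7', '8', '9'].contains c

-- ===== PORT A =====
-- A's loop body: state = (taken_list, class_title)
def pvAStep (st : List String × List Char) (c : Char) : List String × List Char :=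
  if pvIsDigitChar c then
    let title := st.2 ++ [c]
    if title.length = 3 then (st.1 ++ [String.mk title], []) else (st.1, title)
  else st

def make_courses_taken_list (taken_courses : String) : List String :=
  PySem.Set.ofList (taken_courses.toList.foldl pvAStep ([], [])).1

-- ===== PORT B =====
-- B's while-loop: peel complete 3-char chunks off the digit list
def pvChunkLoop (digits : List Char) (chunks : List String) : List String :=
  if 3 ≤ digits.length then
    pvChunkLoop (PySem.List.slice digits (some 3) none)
      (chunks ++ [String.mk (PySem.List.slice digits none (some 3))])
  else chunks
termination_by digits.length
decreasing_by simp [PySem.List.slice]; omega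

def make_courses_taken_list_alt (taken_courses : String) : List String :=
  PySem.Set.ofList (pvChunkLoop (taken_courses.toList.filter pvIsDigitChar) [])

-- ===== PRECONDITION & SPEC =====
def Spec_make_courses_taken_list (taken_courses : String) (out : List String) : Prop := out = make_courses_taken_list_alt taken_courses
instance (taken_courses : String) (out : List String) : Decidable (Spec_make_courses_taken_list taken_courses out) := by unfold Spec_make_courses_taken_list; infer_instance

-- ===== CLAIM (what is proved, stated in full; the proofs are below) =====
def Claim_equal_make_courses_taken_list : Prop := ∀ (taken_courses : String), Dom_make_courses_taken_list taken_courses → Spec_make_courses_taken_list taken_courses (make_courses_taken_list taken_courses)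

-- ===== LEMMAS AND PROOFS =====

lemma pvChunkLoop_nil_of_short (l : List Char) (acc : List String) (h : l.length < 3) :
    pvChunkLoop l acc = acc := by
  rw [pvChunkLoop]
  simp [Nat.not_le.mpr h]

lemma pvChunkLoop_acc2 (n : Nat) : ∀ (l : List Char) (acc1 acc2 : List String), l.length = n →
    pvChunkLoop l (acc1 ++ acc2) = acc1 ++ pvChunkLoop l acc2 := by
  induction n using Nat.strong_induction_on with
  | _ n ih =>
    intro l acc1 acc2 hn
    by_cases h : 3 ≤ l.length
    · conv_lhs => rw [pvChunkLoop]
      conv_rhs => rw [pvChunkLoop]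
      simp only [h, if_pos]
      have hlen : (PySem.List.slice l (some 3) none).length = l.length - 3 := by
        simp [PySem.List.slice]; omega
      rw [List.append_assoc]
      exact ih (l.length - 3) (by omega) _ _ _ hlen
    · rw [pvChunkLoop_nil_of_short l _ (by omega), pvChunkLoop_nil_of_short l _ (by omega)]

lemma pvChunkLoop_acc (l : List Char) (acc : List String) :
    pvChunkLoop l acc = acc ++ pvChunkLoop l [] := by
  have := pvChunkLoop_acc2 l.length l acc [] rfl
  simpa using this

lemma pvChunkLoop_cons3 (t : List Char) (rest : List Char) (ht : t.length = 3) :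
    pvChunkLoop (t ++ rest) [] = String.mk t :: pvChunkLoop rest [] := by
  rw [pvChunkLoop]
  have h : 3 ≤ (t ++ rest).length := by simp [ht]
  simp only [h, if_pos]
  have h1 : PySem.List.slice (t ++ rest) (some 3) none = rest := by
    simp [PySem.List.slice, ht]
  have h2 : PySem.List.slice (t ++ rest) none (some 3) = t := by
    simp [PySem.List.slice]
    rw [List.take_append_of_le_length (by omega)]
    exact List.take_of_length_le (by omega)
  rw [h1, h2, List.nil_append, pvChunkLoop_acc rest [String.mk t]]
  simp

lemma pvFold_inv (cs : List Char) : ∀ (acc : List String) (cur : List Char), cur.length < 3 →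
    (cs.foldl pvAStep (acc, cur)).1 = acc ++ pvChunkLoop (cur ++ cs.filter pvIsDigitChar) [] := by
  induction cs with
  | nil =>
    intro acc cur hcur
    simp [pvChunkLoop_nil_of_short _ _ (by simpa using hcur)]
  | cons c cs ih =>
    intro acc cur hcur
    by_cases hd : pvIsDigitChar c
    · by_cases h3 : (cur ++ [c]).length = 3
      · have hstep : pvAStep (acc, cur) c = (acc ++ [String.mk (cur ++ [c])], []) := by
          unfold pvAStep; rw [if_pos hd, if_pos h3]
        rw [List.foldl_cons, hstep, ih _ [] (by simp)]
        have : (cur ++ [c]) ++ cs.filter pvIsDigitChar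
            = cur ++ (c :: cs).filter pvIsDigitChar := by simp [hd]
        rw [← this, pvChunkLoop_cons3 _ _ h3]
        simp
      · have hstep : pvAStep (acc, cur) c = (acc, cur ++ [c]) := by
          unfold pvAStep; rw [if_pos hd, if_neg h3]
        have hlt : (cur ++ [c]).length < 3 := by
          simp at h3 ⊢; omega
        rw [List.foldl_cons, hstep, ih _ _ hlt]
        simp [hd]
    · have hstep : pvAStep (acc, cur) c = (acc, cur) := by simp [pvAStep, hd]
      rw [List.foldl_cons, hstep, ih _ _ hcur]
      simp [hd]

-- ===== VERDICT (by name: the statement is the Claim_ definition above) =====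
theorem make_courses_taken_list_spec : Claim_equal_make_courses_taken_list := by
  intro s _
  unfold Spec_make_courses_taken_list make_courses_taken_list make_courses_taken_list_alt
  rw [pvFold_inv s.toList [] [] (by simp)]
  simp
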